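-- pv_equiv track=rewrite | github.com/Cinderlia/LLM_taint_on_trace | if_extract.py | resolve_top_id
-- ===== SOURCE A (Python) =====
-- def resolve_top_id(nid, parent_of, nodes, top_id_to_file):
--     cur = nid
--     steps = 0
--     while cur is not None and steps < 64:
--         if cur in top_id_to_file:
--             return cur
--         nxt = parent_of.get(cur)
--         if nxt is None:
--             funcid = nodes.get(cur, {}).get('funcid')
--             cur = funcid
--         else:
--             cur = nxt
--         steps += 1
--     return None
-- ===== SOURCE B (Python) =====
-- def resolve_top_id(nid, parent_of, nodes, top_id_to_file):
--     def succ(c):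
--         nxt = parent_of.get(c)
--         if nxt is not None:
--             return nxt
--         return nodes.get(c, {}).get('funcid')
--
--     chain = []
--     cur = nid
--     while cur is not None and len(chain) < 64:
--         chain.append(cur)
--         cur = succ(cur)
--     return next((c for c in chain if c in top_id_to_file), None)
-- ===== Notes on version B (the rewrite author's own statement) =====
-- stated objective: alternative
-- what changed: B separates the two concerns of A's interleaved while-loop: it first materialises the (at most 64-element) parent/funcid chain starting at nid, then searches that chain for the first id present in top_id_to_file, instead of testing membership inside the walking loop.
import Mathlib
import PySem

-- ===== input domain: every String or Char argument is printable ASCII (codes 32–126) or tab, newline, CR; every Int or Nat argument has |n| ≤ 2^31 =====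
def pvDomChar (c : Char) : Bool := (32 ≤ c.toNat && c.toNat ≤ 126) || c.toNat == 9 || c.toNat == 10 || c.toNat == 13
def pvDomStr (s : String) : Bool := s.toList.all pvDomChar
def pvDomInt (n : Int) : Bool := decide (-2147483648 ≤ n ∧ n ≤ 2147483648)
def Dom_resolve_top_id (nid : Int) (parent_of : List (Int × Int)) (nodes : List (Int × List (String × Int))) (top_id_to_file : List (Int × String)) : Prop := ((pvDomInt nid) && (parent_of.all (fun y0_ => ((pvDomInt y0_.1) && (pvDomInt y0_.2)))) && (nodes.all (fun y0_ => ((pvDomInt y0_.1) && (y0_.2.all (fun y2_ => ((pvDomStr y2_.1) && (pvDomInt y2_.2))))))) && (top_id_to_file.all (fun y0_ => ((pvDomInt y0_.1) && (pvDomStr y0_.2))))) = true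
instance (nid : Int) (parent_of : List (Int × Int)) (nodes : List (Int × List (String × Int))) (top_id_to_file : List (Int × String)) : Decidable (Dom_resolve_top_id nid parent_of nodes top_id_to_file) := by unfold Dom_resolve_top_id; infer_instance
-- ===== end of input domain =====

-- B decouples A's interleaved walk-and-test loop: it first builds the ≤64-element
-- parent/funcid chain, then finds the first chain element present in top_id_to_file
-- (objective: alternative decomposition, same cost).

-- ===== PORT A =====
-- the while-loop of A: state = (cur, remaining fuel), membership tested before advancing
def resolveLoopA (parent_of : List (Int × Int)) (nodes : List (Int × List (String × Int))) (top_id_to_file : List (Int × String)) : Option Int → Nat → Option Int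
  | none, _ => none
  | some _, 0 => none
  | some cur, fuel + 1 =>
    if (top_id_to_file.lookup cur).isSome then some cur
    else
      match parent_of.lookup cur with
      | some nxt => resolveLoopA parent_of nodes top_id_to_file (some nxt) fuel
      | none =>
        resolveLoopA parent_of nodes top_id_to_file
          (((nodes.lookup cur).getD []).lookup "funcid") fuel

def resolve_top_id (nid : Int) (parent_of : List (Int × Int)) (nodes : List (Int × List (String × Int))) (top_id_to_file : List (Int × String)) : Option Int :=
  resolveLoopA parent_of nodes top_id_to_file (some nid) 64

-- ===== PORT B =====
-- successor in the parent/funcid chain (B's helper `succ`)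
def succB (parent_of : List (Int × Int)) (nodes : List (Int × List (String × Int))) (c : Int) : Option Int :=
  match parent_of.lookup c with
  | some nxt => some nxt
  | none => ((nodes.lookup c).getD []).lookup "funcid"

-- B's chain-building loop: the list of visited ids, at most `fuel` of them
def chainB (parent_of : List (Int × Int)) (nodes : List (Int × List (String × Int))) : Option Int → Nat → List Int
  | none, _ => []
  | some _, 0 => []
  | some c, fuel + 1 => c :: chainB parent_of nodes (succB parent_of nodes c) fuel

def resolve_top_id_alt (nid : Int) (parent_of : List (Int × Int)) (nodes : List (Int × List (String × Int))) (top_id_to_file : List (Int × String)) : Option Int :=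
  (chainB parent_of nodes (some nid) 64).find? (fun c => (top_id_to_file.lookup c).isSome)

-- ===== PRECONDITION & SPEC =====
def Spec_resolve_top_id (nid : Int) (parent_of : List (Int × Int)) (nodes : List (Int × List (String × Int))) (top_id_to_file : List (Int × String)) (out : Option Int) : Prop := out = resolve_top_id_alt nid parent_of nodes top_id_to_file
instance (nid : Int) (parent_of : List (Int × Int)) (nodes : List (Int × List (String × Int))) (top_id_to_file : List (Int × String)) (out : Option Int) : Decidable (Spec_resolve_top_id nid parent_of nodes top_id_to_file out) := by unfold Spec_resolve_top_id; infer_instance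

-- ===== CLAIM (what is proved, stated in full; the proofs are below) =====
def Claim_equal_resolve_top_id : Prop := ∀ (nid : Int) (parent_of : List (Int × Int)) (nodes : List (Int × List (String × Int))) (top_id_to_file : List (Int × String)), Dom_resolve_top_id nid parent_of nodes top_id_to_file → Spec_resolve_top_id nid parent_of nodes top_id_to_file (resolve_top_id nid parent_of nodes top_id_to_file)

-- ===== LEMMAS AND PROOFS =====
theorem loopA_eq_find_chain (parent_of : List (Int × Int)) (nodes : List (Int × List (String × Int))) (top_id_to_file : List (Int × String)) :
    ∀ (fuel : Nat) (st : Option Int),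
      resolveLoopA parent_of nodes top_id_to_file st fuel =
        (chainB parent_of nodes st fuel).find? (fun c => (top_id_to_file.lookup c).isSome) := by
  intro fuel
  induction fuel with
  | zero =>
    intro st
    cases st <;> simp [resolveLoopA, chainB]
  | succ fuel ih =>
    intro st
    cases st with
    | none => simp [resolveLoopA, chainB]
    | some c =>
      rw [resolveLoopA, chainB, List.find?_cons]
      by_cases h : (top_id_to_file.lookup c).isSome
      · simp [h]
      · simp only [h, Bool.false_eq_true, if_false]
        cases hp : parent_of.lookup c with
        | none => simp only [succB, hp]; exact ih _
        | some nxt => simp only [succB, hp]; exact ih _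

-- ===== VERDICT (by name: the statement is the Claim_ definition above) =====
theorem resolve_top_id_spec : Claim_equal_resolve_top_id := by
  intro nid parent_of nodes top_id_to_file _
  unfold Spec_resolve_top_id resolve_top_id resolve_top_id_alt
  exact loopA_eq_find_chain parent_of nodes top_id_to_file 64 (some nid)
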